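-- pv_equiv track=rewrite | github.com/gthompson30/wordle-solver | wordletester.py | assess_move
-- ===== SOURCE A (Python) =====
-- def assess_guess(guess, correct):
-- 	out = []
-- 	added = {k: 0 for k in [chr(i) for i in range(ord('a'), ord('z') + 1)]}
-- 	for index, letter in enumerate(guess):
-- 		if letter == correct[index]:
-- 			out.append('2')
-- 			added[letter] += 1
-- 		elif letter in correct:
-- 			out.append('X')
-- 		else:
-- 			out.append('0')
-- 	for index, code in enumerate(out):
-- 		if code == 'X':
-- 			if added[guess[index]] < correct.count(guess[index]):
-- 				out[index] = '1'
-- 				added[guess[index]] += 1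
-- 			else:
-- 				out[index] = '0'
-- 	return ''.join(out)
--
-- def assess_move(set_of_answers, move):
-- 	dist = {}
-- 	chars = '012'
-- 	for first in chars:
-- 		for second in chars:
-- 			for third in chars:
-- 				for fourth in chars:
-- 					for fifth in chars:
-- 						dist[first + second + third + fourth + fifth] = []
-- 	for next_guess in set_of_answers:
-- 		result = assess_guess(move, next_guess)
-- 		dist[result].append(next_guess)
-- 	return dist
-- ===== SOURCE B (Python) =====
-- def assess_guess(guess, correct):
--     # Stateless, per-position closed form: position i is green when the letters
--     # match; otherwise it is yellow exactly when the number of earlier non-green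
--     # occurrences of the same letter (its occurrence rank) is still below the
--     # number of copies of that letter in `correct` not used up by greens.
--     n = len(guess)
--     green = [guess[i] == correct[i] for i in range(n)]
--
--     def avail(ch):
--         return correct.count(ch) - sum(1 for j in range(n) if green[j] and guess[j] == ch)
--
--     out = []
--     for i in range(n):
--         if green[i]:
--             out.append('2')
--         else:
--             rank = sum(1 for j in range(i) if not green[j] and guess[j] == guess[i])
--             out.append('1' if rank < avail(guess[i]) else '0')
--     return ''.join(out)
--
--
-- def assess_move(set_of_answers, move):
--     # Group first, emit afterwards: score every answer, build the groups,
--     # then lay the 243 patterns out in lexicographic order at the end.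
--     pairs = [(assess_guess(move, ans), ans) for ans in set_of_answers]
--     groups = {}
--     for key, ans in pairs:
--         groups[key] = groups.get(key, []) + [ans]
--     keys = ['']
--     for _ in range(5):
--         keys = [k + d for k in keys for d in '012']
--     return {k: groups.get(k, []) for k in keys}
-- ===== Notes on version B (the rewrite author's own statement) =====
-- stated objective: alternative
-- what changed: assess_guess drops A's mutable two-pass with the 'X' placeholder for a stateless per-position closed form (green, else yellow iff the letter's occurrence rank among earlier non-green positions is below its count in the answer not used by greens), and assess_move groups the answers first and only then lays out the 243 patterns (built by iterated list products) instead of prefilling a dict and appending into it.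
import Mathlib
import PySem

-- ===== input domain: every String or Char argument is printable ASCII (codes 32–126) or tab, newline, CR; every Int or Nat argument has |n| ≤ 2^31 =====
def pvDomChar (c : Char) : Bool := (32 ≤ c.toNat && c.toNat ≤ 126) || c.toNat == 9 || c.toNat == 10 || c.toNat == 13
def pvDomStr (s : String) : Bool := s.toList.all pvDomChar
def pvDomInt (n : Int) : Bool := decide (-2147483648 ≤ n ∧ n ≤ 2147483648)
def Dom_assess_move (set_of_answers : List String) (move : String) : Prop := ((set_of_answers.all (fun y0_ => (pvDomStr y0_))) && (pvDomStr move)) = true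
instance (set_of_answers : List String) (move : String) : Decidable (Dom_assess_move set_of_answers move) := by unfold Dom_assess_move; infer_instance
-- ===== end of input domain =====

-- B scores each position by a stateless closed form (green, else yellow iff the letter's
-- occurrence rank among earlier non-green positions is below its unused count in the answer)
-- instead of A's mutable two-pass with an 'X' placeholder, and groups the answers first and
-- emits the 243 patterns afterwards instead of prefilling then appending (objective: alternative).

-- ===== PORT A =====
-- added = {k: 0 for k in [chr(i) for i in range(ord('a'), ord('z') + 1)]}
def addedInitA : PySem.Dict Char Int :=
  ((PySem.List.pyRange 97 123 1).map (fun i => Char.ofNat i.toNat)).foldl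
    (fun d k => d.insert k 0) PySem.Dict.empty

-- first loop of assess_guess: none = IndexError (correct[index]) or KeyError (added[letter])
def pass1A (correct : List Char) : List Char → Int → PySem.Dict Char Int →
    Option (List Char × PySem.Dict Char Int)
  | [], _, added => some ([], added)
  | letter :: rest, index, added =>
    match PySem.List.pyGet? correct index with
    | none => none
    | some ci =>
      if letter = ci then
        match added.get? letter with
        | none => none
        | some v =>
          match pass1A correct rest (index + 1) (added.insert letter (v + 1)) with
          | none => none
          | some (out, a) => some ('2' :: out, a)
      else if letter ∈ correct then
        match pass1A correct rest (index + 1) added with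
        | none => none
        | some (out, a) => some ('X' :: out, a)
      else
        match pass1A correct rest (index + 1) added with
        | none => none
        | some (out, a) => some ('0' :: out, a)

-- second loop of assess_guess (out[index] is only ever rewritten at the current position,
-- so the in-place mutation is this stateful rebuild); none = KeyError on added[guess[index]]
def pass2A (guess correct : List Char) : List Char → Int → PySem.Dict Char Int → Option (List Char)
  | [], _, _ => some []
  | code :: rest, index, added =>
    if code = 'X' then
      match PySem.List.pyGet? guess index with
      | none => none
      | some g =>
        match added.get? g with
        | none => none
        | some v =>
          if v < (correct.count g : Int) then
            match pass2A guess correct rest (index + 1) (added.insert g (v + 1)) with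
            | none => none
            | some out => some ('1' :: out)
          else
            match pass2A guess correct rest (index + 1) added with
            | none => none
            | some out => some ('0' :: out)
    else
      match pass2A guess correct rest (index + 1) added with
      | none => none
      | some out => some (code :: out)

def assess_guessA (guess correct : List Char) : Option String :=
  match pass1A correct guess 0 addedInitA with
  | none => none
  | some (out, added) =>
    match pass2A guess correct out 0 added with
    | none => none
    | some out2 => some (String.ofList out2)   -- ''.join(out)

-- dist = {} prefilled by the five nested loops over chars = '012'
def distInitA : PySem.Dict String (List String) :=
  "012".toList.foldl (fun d1 c1 =>
    "012".toList.foldl (fun d2 c2 =>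
      "012".toList.foldl (fun d3 c3 =>
        "012".toList.foldl (fun d4 c4 =>
          "012".toList.foldl (fun d5 c5 =>
            d5.insert (String.ofList [c1, c2, c3, c4, c5]) []) d4) d3) d2) d1)
    PySem.Dict.empty

-- for next_guess in set_of_answers: dist[assess_guess(move, next_guess)].append(next_guess)
def loopA (move : String) : List String → PySem.Dict String (List String) →
    Option (PySem.Dict String (List String))
  | [], dist => some dist
  | next_guess :: rest, dist =>
    match assess_guessA move.toList next_guess.toList with
    | none => none
    | some result =>
      match dist.get? result with
      | none => none   -- KeyError
      | some lst => loopA move rest (dist.insert result (lst ++ [next_guess]))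

def assess_move (set_of_answers : List String) (move : String) : List (String × List String) :=
  match loopA move set_of_answers distInitA with
  | none => []   -- Python raises here; excluded by Pre_
  | some dist => dist.items

-- ===== PORT B =====
-- green = [guess[i] == correct[i] for i in range(n)]; none = IndexError on correct[i]
def greenB : List Char → List Char → Option (List Bool)
  | [], _ => some []
  | _ :: _, [] => none
  | g :: gs, c :: cs =>
    match greenB gs cs with
    | none => none
    | some r => some ((g == c) :: r)

-- avail(ch) = correct.count(ch) - sum(1 for j in range(n) if green[j] and guess[j] == ch)
def availB (gs cs : List Char) (green : List Bool) (ch : Char) : Int :=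
  (cs.count ch : Int) - (((gs.zip green).countP (fun p => p.2 && p.1 == ch) : Nat) : Int)

-- the output loop: '2' at greens, else rank = sum(1 for j in range(i) if not green[j] and
-- guess[j] == guess[i]) and '1' iff rank < avail(guess[i]); `seen` is the processed prefix
def codesB (avail : Char → Int) : List (Char × Bool) → List (Char × Bool) → List Char
  | _, [] => []
  | seen, (g, mk) :: rest =>
    (if mk then '2'
     else if ((seen.countP (fun p => !p.2 && p.1 == g) : Nat) : Int) < avail g then '1' else '0')
      :: codesB avail (seen ++ [(g, mk)]) rest

def assess_guessB (guess correct : List Char) : Option String :=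
  match greenB guess correct with
  | none => none
  | some green =>
    some (String.ofList (codesB (availB guess correct green) [] (guess.zip green)))

-- pairs = [(assess_guess(move, ans), ans) for ans in set_of_answers]
def pairsB (move : String) : List String → Option (List (String × String))
  | [] => some []
  | ans :: rest =>
    match assess_guessB move.toList ans.toList with
    | none => none
    | some r =>
      match pairsB move rest with
      | none => none
      | some ps => some ((r, ans) :: ps)

-- groups[key] = groups.get(key, []) + [ans]
def groupsB (ps : List (String × String)) : PySem.Dict String (List String) :=
  ps.foldl (fun d p => d.insert p.1 (d.getD p.1 [] ++ [p.2])) PySem.Dict.empty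

-- keys = [k + d for k in keys for d in '012'], five rounds from ['']
def keyStepB (ks : List (List Char)) : List (List Char) :=
  ks.flatMap (fun k => "012".toList.map (fun d => k ++ [d]))

def keysB : Nat → List (List Char) → List (List Char)
  | 0, ks => ks
  | n + 1, ks => keysB n (keyStepB ks)

-- return {k: groups.get(k, []) for k in keys}
def assess_move_alt (set_of_answers : List String) (move : String) : List (String × List String) :=
  match pairsB move set_of_answers with
  | none => []   -- Python B raises (IndexError) here; excluded by Pre_
  | some ps =>
    ((keysB 5 [[]]).foldl
      (fun d k => d.insert (String.ofList k) ((groupsB ps).getD (String.ofList k) []))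
      PySem.Dict.empty).items

-- ===== PRECONDITION & SPEC =====
-- Pre_ is exactly where Python A returns: with any answer present, the move must have length 5
-- (else the final dist[result] raises KeyError), every answer must be at least 5 long (else
-- correct[index] raises IndexError), and every letter of the move that occurs in an answer must
-- be lowercase a-z (else added[letter] raises KeyError).
def Pre_assess_move (set_of_answers : List String) (move : String) : Prop :=
  ∀ ans ∈ set_of_answers, move.toList.length = 5 ∧ 5 ≤ ans.toList.length ∧
    (move.toList.all
      (fun c => !(ans.toList.contains c) || (97 ≤ c.toNat && c.toNat ≤ 122))) = true
instance (set_of_answers : List String) (move : String) :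
    Decidable (Pre_assess_move set_of_answers move) := by unfold Pre_assess_move; infer_instance

def pvWitness_assess_move : List String × String := (["abcde", "crane"], "cabed")

def Spec_assess_move (set_of_answers : List String) (move : String)
    (out : List (String × List String)) : Prop := out = assess_move_alt set_of_answers move
instance (set_of_answers : List String) (move : String) (out : List (String × List String)) :
    Decidable (Spec_assess_move set_of_answers move out) := by unfold Spec_assess_move; infer_instance

-- ===== CLAIM (what is proved, stated in full; the proofs are below) =====
def Claim_equal_assess_move : Prop := ∀ (set_of_answers : List String) (move : String),
  Dom_assess_move set_of_answers move → Pre_assess_move set_of_answers move →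
  Spec_assess_move set_of_answers move (assess_move set_of_answers move)

-- ===== LEMMAS AND PROOFS =====

-- the feedback character A's first pass records at a position
def ruleA (corr : List Char) (g c : Char) : Char :=
  if g = c then '2' else if g ∈ corr then 'X' else '0'

-- the dictionary state after A's first pass (greens tally), aligned on guess/correct pairs
def greensA : List (Char × Char) → PySem.Dict Char Int → PySem.Dict Char Int
  | [], d => d
  | (g, c) :: rest, d =>
    if g = c then greensA rest (d.insert g (d.getD g 0 + 1)) else greensA rest d

-- A's second pass, aligned on guess/code pairs, total
def alignA2 (corr : List Char) : List (Char × Char) → PySem.Dict Char Int → List Char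
  | [], _ => []
  | (g, code) :: rest, added =>
    if code = 'X' then
      if added.getD g 0 < (corr.count g : Int) then
        '1' :: alignA2 corr rest (added.insert g (added.getD g 0 + 1))
      else '0' :: alignA2 corr rest added
    else code :: alignA2 corr rest added

-- proof-layer intermediate: the counter-consuming yellow pass (left-to-right decrement)
def passC : List (Char × Bool) → PySem.Dict Char Int → List Char
  | [], _ => []
  | (g, mk) :: rest, rem =>
    if mk then '2' :: passC rest rem
    else if 0 < rem.getD g 0 then '1' :: passC rest (rem.modify g 0 (· - 1))
    else '0' :: passC rest rem

def rem0C (correct : List Char) : PySem.Dict Char Int :=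
  correct.foldl (fun d ch => d.insert ch (d.getD ch 0 + 1)) PySem.Dict.empty

def rem1C (guess : List Char) (marks : List Bool) (d : PySem.Dict Char Int) :
    PySem.Dict Char Int :=
  (guess.zip marks).foldl (fun d p => if p.2 then d.modify p.1 0 (· - 1) else d) d

def isLow (x : Char) : Prop := 97 ≤ x.toNat ∧ x.toNat ≤ 122

-- the 243 patterns as strings
def KS : List String := (keysB 5 [[]]).map String.ofList

theorem keyStepB_nodup (ks : List (List Char)) (h : ks.Nodup) : (keyStepB ks).Nodup := by
  unfold keyStepB
  rw [List.nodup_flatMap]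
  refine ⟨fun k _ => ?_, ?_⟩
  · refine List.Nodup.map ?_ (by decide)
    intro a b hab
    simpa using (List.append_inj' hab rfl).2
  · refine h.imp (fun {a b} hab => ?_)
    intro x hxa hxb
    obtain ⟨da, _, hda⟩ := List.mem_map.mp hxa
    obtain ⟨db, _, hdb⟩ := List.mem_map.mp hxb
    exact hab (List.append_inj' (hda.trans hdb.symm) rfl).1

theorem keysB_nodup : ∀ (n : Nat) (ks : List (List Char)), ks.Nodup → (keysB n ks).Nodup := by
  intro n
  induction n with
  | zero => intro ks h; simpa [keysB] using h
  | succ n ih => intro ks h; simpa [keysB] using ih _ (keyStepB_nodup ks h)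

theorem KS_nodup : KS.Nodup := by
  unfold KS
  refine (keysB_nodup 5 [[]] (by decide)).map ?_
  intro a b hab
  simpa using congrArg String.toList hab

set_option maxRecDepth 40000 in
set_option maxHeartbeats 4000000 in
theorem distInit_facts : distInitA.keys = KS ∧
    distInitA.values = List.replicate 243 ([] : List String) := by decide

theorem KS_keys : distInitA.keys = KS := distInit_facts.1

theorem distInitA_getD (x : String) : distInitA.getD x [] = [] := by
  rw [PySem.Dict.getD_eq_get?_getD]
  cases h : distInitA.get? x with
  | none => rfl
  | some v =>
    have hv : v ∈ distInitA.values :=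
      List.mem_map_of_mem (PySem.Dict.mem_items_of_get?_eq_some _ h)
    rw [distInit_facts.2] at hv
    simp [List.eq_of_mem_replicate hv]

theorem greensA_getD (ps : List (Char × Char)) : ∀ (d : PySem.Dict Char Int) (x : Char),
    (greensA ps d).getD x 0 =
      d.getD x 0 + (ps.countP (fun p => p.1 == p.2 && p.1 == x) : Int) := by
  induction ps with
  | nil => intro d x; simp [greensA]
  | cons p rest ih =>
    intro d x
    obtain ⟨g, c⟩ := p
    simp only [greensA, List.countP_cons]
    by_cases hgc : g = c
    · subst hgc
      rw [if_pos rfl, ih, PySem.Dict.getD_insert]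
      by_cases hxg : x = g
      · subst hxg; simp; ring
      · have hb : (g == x) = false := by simp [Ne.symm hxg]
        simp [hxg, hb]
    · have hb : (g == c) = false := by simp [hgc]
      rw [if_neg hgc, ih]
      simp [hb]

theorem greensA_contains (ps : List (Char × Char)) : ∀ (d : PySem.Dict Char Int) (x : Char),
    d.contains x = true → (greensA ps d).contains x = true := by
  induction ps with
  | nil => intro d x h; simpa [greensA] using h
  | cons p rest ih =>
    intro d x h
    obtain ⟨g, c⟩ := p
    simp only [greensA]
    by_cases hgc : g = c
    · rw [if_pos hgc]; exact ih _ _ (by simp [PySem.Dict.contains_insert, h])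
    · rw [if_neg hgc]; exact ih _ _ h

theorem fold_insert0_getD (l : List Char) : ∀ (d : PySem.Dict Char Int),
    (∀ x : Char, d.getD x 0 = (0 : Int)) →
    ∀ x : Char, (l.foldl (fun d k => d.insert k 0) d).getD x 0 = 0 := by
  induction l with
  | nil => intro d h x; simpa using h x
  | cons k l ih =>
    intro d h x
    simp only [List.foldl_cons]
    refine ih _ (fun y => ?_) x
    rw [PySem.Dict.getD_insert]
    split_ifs with h'
    · rfl
    · exact h y

theorem fold_insert0_contains_mono (l : List Char) : ∀ (d : PySem.Dict Char Int) (x : Char),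
    d.contains x = true → (l.foldl (fun d k => d.insert k 0) d).contains x = true := by
  induction l with
  | nil => intro d x h; simpa using h
  | cons k l ih =>
    intro d x h
    simp only [List.foldl_cons]
    exact ih _ _ (by simp [PySem.Dict.contains_insert, h])

theorem fold_insert0_contains_mem (l : List Char) : ∀ (d : PySem.Dict Char Int) (x : Char),
    x ∈ l → (l.foldl (fun d k => d.insert k 0) d).contains x = true := by
  induction l with
  | nil => intro d x h; simp at h
  | cons k l ih =>
    intro d x h
    simp only [List.foldl_cons]
    rcases List.mem_cons.mp h with h1 | h2
    · subst h1; exact fold_insert0_contains_mono l _ x (by simp [PySem.Dict.contains_insert_self])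
    · exact ih _ _ h2

theorem addedInitA_getD (x : Char) : addedInitA.getD x 0 = 0 := by
  unfold addedInitA
  exact fold_insert0_getD _ _ (fun y => by simp [PySem.Dict.getD_empty]) x

theorem addedInitA_contains (x : Char) (h : isLow x) : addedInitA.contains x = true := by
  unfold addedInitA
  apply fold_insert0_contains_mem
  simp only [List.mem_map]
  refine ⟨(x.toNat : Int), ?_, ?_⟩
  · rw [PySem.List.mem_pyRange_one]
    constructor
    · exact_mod_cast h.1
    · exact_mod_cast Nat.lt_succ_of_le h.2
  · simp [Char.ofNat_toNat]

theorem pass1A_eq (gs : List Char) : ∀ (cs pre : List Char) (added : PySem.Dict Char Int),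
    gs.length ≤ cs.length →
    (∀ g ∈ gs, g ∈ pre ++ cs → isLow g) →
    (∀ x : Char, isLow x → added.contains x = true) →
    pass1A (pre ++ cs) gs (pre.length : Int) added =
      some ((gs.zip cs).map (fun p => ruleA (pre ++ cs) p.1 p.2), greensA (gs.zip cs) added) := by
  induction gs with
  | nil => intro cs pre added _ _ _; simp [pass1A, greensA]
  | cons g gs ih =>
    intro cs pre added hlen hlow hcont
    cases cs with
    | nil => simp at hlen
    | cons c cs =>
      have hget : PySem.List.pyGet? (pre ++ c :: cs) (pre.length : Int) = some c :=
        PySem.List.pyGet?_append_length pre cs c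
      have hassoc : pre ++ c :: cs = (pre ++ [c]) ++ cs := by simp
      have hlen1 : (pre.length : Int) + 1 = (((pre ++ [c]).length : Nat) : Int) := by
        simp
      have hlen' : gs.length ≤ cs.length := by simpa using hlen
      have hlow' : ∀ g' ∈ gs, g' ∈ pre ++ c :: cs → isLow g' :=
        fun g' h1 h2 => hlow g' (List.mem_cons_of_mem _ h1) h2
      simp only [pass1A, hget]
      by_cases hgc : g = c
      · have hgm : g ∈ pre ++ c :: cs := by subst hgc; simp
        have hl : isLow g := hlow g (List.mem_cons_self) hgm
        have hc := hcont g hl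
        rw [PySem.Dict.contains_eq_isSome_get?] at hc
        cases hv : added.get? g with
        | none => rw [hv] at hc; simp at hc
        | some v =>
          have hvd : added.getD g 0 = v := by rw [PySem.Dict.getD_eq_get?_getD, hv]; rfl
          have hcont' : ∀ x : Char, isLow x → (added.insert g (v + 1)).contains x = true :=
            fun x hx => by simp [PySem.Dict.contains_insert, hcont x hx]
          rw [if_pos hgc, hlen1, hassoc]
          show (match pass1A (pre ++ [c] ++ cs) gs (((pre ++ [c]).length : Nat) : Int)
                  (added.insert g (v + 1)) with
                | none => (none : Option (List Char × PySem.Dict Char Int))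
                | some (out, a) => some ('2' :: out, a)) = _
          rw [ih cs (pre ++ [c]) (added.insert g (v + 1)) hlen'
              (by rw [← hassoc]; exact hlow') hcont']
          simp only [List.zip_cons_cons, List.map_cons, greensA, if_pos hgc]
          rw [← hassoc]
          simp [ruleA, hgc]
          rw [← hgc, hvd]
      · rw [if_neg hgc]
        by_cases hmem : g ∈ pre ++ c :: cs
        · rw [if_pos hmem, hlen1, hassoc, ih cs (pre ++ [c]) added hlen'
            (by rw [← hassoc]; exact hlow') hcont]
          simp only [List.zip_cons_cons, List.map_cons, greensA, if_neg hgc]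
          rw [← hassoc]
          have hr : ruleA (pre ++ c :: cs) g c = 'X' := by simp [ruleA, hgc, hmem]
          rw [hr]
        · rw [if_neg hmem, hlen1, hassoc, ih cs (pre ++ [c]) added hlen'
            (by rw [← hassoc]; exact hlow') hcont]
          simp only [List.zip_cons_cons, List.map_cons, greensA, if_neg hgc]
          rw [← hassoc]
          have hr : ruleA (pre ++ c :: cs) g c = '0' := by simp [ruleA, hgc, hmem]
          rw [hr]

theorem pass2A_eq (codes : List Char) : ∀ (gs gpre corr : List Char) (added : PySem.Dict Char Int),
    codes.length = gs.length →
    (∀ p ∈ gs.zip codes, p.2 = 'X' → isLow p.1) →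
    (∀ x : Char, isLow x → added.contains x = true) →
    pass2A (gpre ++ gs) corr codes (gpre.length : Int) added =
      some (alignA2 corr (gs.zip codes) added) := by
  induction codes with
  | nil => intro gs gpre corr added _ _ _; simp [pass2A, alignA2]
  | cons code rest ih =>
    intro gs gpre corr added hlen hX hcont
    cases gs with
    | nil => simp at hlen
    | cons g gs =>
      have hget : PySem.List.pyGet? (gpre ++ g :: gs) (gpre.length : Int) = some g :=
        PySem.List.pyGet?_append_length gpre gs g
      have hassoc : gpre ++ g :: gs = (gpre ++ [g]) ++ gs := by simp
      have hlen1 : (gpre.length : Int) + 1 = (((gpre ++ [g]).length : Nat) : Int) := by simp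
      have hlen' : rest.length = gs.length := by simpa using hlen
      have hX' : ∀ p ∈ gs.zip rest, p.2 = 'X' → isLow p.1 :=
        fun p h1 h2 => hX p (List.mem_cons_of_mem _ h1) h2
      simp only [pass2A, hget, List.zip_cons_cons, alignA2]
      by_cases hcode : code = 'X'
      · subst hcode
        have hl : isLow g := hX (g, 'X') List.mem_cons_self rfl
        have hc := hcont g hl
        rw [PySem.Dict.contains_eq_isSome_get?] at hc
        cases hv : added.get? g with
        | none => rw [hv] at hc; simp at hc
        | some v =>
          have hvd : added.getD g 0 = v := by rw [PySem.Dict.getD_eq_get?_getD, hv]; rfl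
          rw [if_pos rfl, if_pos rfl, hvd]
          show (if v < (corr.count g : Int) then
                  match pass2A (gpre ++ g :: gs) corr rest ((gpre.length : Int) + 1)
                      (added.insert g (v + 1)) with
                  | none => (none : Option (List Char))
                  | some out => some ('1' :: out)
                else
                  match pass2A (gpre ++ g :: gs) corr rest ((gpre.length : Int) + 1) added with
                  | none => none
                  | some out => some ('0' :: out)) = _
          by_cases hlt : v < (corr.count g : Int)
          · have hcont' : ∀ x : Char, isLow x → (added.insert g (v + 1)).contains x = true :=
              fun x hx => by simp [PySem.Dict.contains_insert, hcont x hx]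
            rw [if_pos hlt, if_pos hlt, hlen1, hassoc]
            show (match pass2A ((gpre ++ [g]) ++ gs) corr rest (((gpre ++ [g]).length : Nat) : Int)
                    (added.insert g (v + 1)) with
                  | none => (none : Option (List Char))
                  | some out => some ('1' :: out)) = _
            rw [ih gs (gpre ++ [g]) corr (added.insert g (v + 1)) hlen' hX' hcont']
          · rw [if_neg hlt, if_neg hlt, hlen1, hassoc]
            show (match pass2A ((gpre ++ [g]) ++ gs) corr rest (((gpre ++ [g]).length : Nat) : Int)
                    added with
                  | none => (none : Option (List Char))
                  | some out => some ('0' :: out)) = _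
            rw [ih gs (gpre ++ [g]) corr added hlen' hX' hcont]
      · rw [if_neg hcode, if_neg hcode, hlen1, hassoc]
        show (match pass2A ((gpre ++ [g]) ++ gs) corr rest (((gpre ++ [g]).length : Nat) : Int)
                added with
              | none => (none : Option (List Char))
              | some out => some (code :: out)) = _
        rw [ih gs (gpre ++ [g]) corr added hlen' hX' hcont]

theorem greenB_eq (gs : List Char) : ∀ cs : List Char, gs.length ≤ cs.length →
    greenB gs cs = some ((gs.zip cs).map (fun p => p.1 == p.2)) := by
  induction gs with
  | nil => intro cs h; simp [greenB]
  | cons g gs ih =>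
    intro cs h
    cases cs with
    | nil => simp at h
    | cons c cs => simp [greenB, ih cs (by simpa using h)]

theorem zip_map_snd {β : Type} (gs : List Char) : ∀ (cs : List Char) (f : Char × Char → β),
    gs.zip ((gs.zip cs).map f) = (gs.zip cs).map (fun p => (p.1, f p)) := by
  induction gs with
  | nil => intro cs f; simp
  | cons g gs ih =>
    intro cs f
    cases cs with
    | nil => simp
    | cons c cs => simp [ih]

theorem subfold_getD (ps : List (Char × Bool)) : ∀ (d : PySem.Dict Char Int) (x : Char),
    (ps.foldl (fun d p => if p.2 then d.modify p.1 0 (· - 1) else d) d).getD x 0 =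
      d.getD x 0 - (ps.countP (fun p => p.2 && p.1 == x) : Int) := by
  induction ps with
  | nil => intro d x; simp
  | cons p rest ih =>
    intro d x
    obtain ⟨g, b⟩ := p
    simp only [List.foldl_cons, List.countP_cons]
    cases b with
    | false => rw [if_neg (by simp), ih]; simp
    | true =>
      rw [ih, if_pos rfl, PySem.Dict.getD_modify]
      by_cases hxg : x = g
      · subst hxg; simp; ring
      · have hb : (g == x) = false := by simp [Ne.symm hxg]
        simp [hxg, hb]

theorem core_eq (ps : List (Char × Char)) (corr : List Char) :
    ∀ (added rem : PySem.Dict Char Int),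
    (∀ x : Char, rem.getD x 0 = (corr.count x : Int) - added.getD x 0) →
    (∀ x : Char, 0 ≤ added.getD x 0) →
    alignA2 corr (ps.map (fun p => (p.1, ruleA corr p.1 p.2))) added =
      passC (ps.map (fun p => (p.1, p.1 == p.2))) rem := by
  induction ps with
  | nil => intro added rem hI hpos; simp [alignA2, passC]
  | cons p rest ih =>
    intro added rem hI hpos
    obtain ⟨g, c⟩ := p
    simp only [List.map_cons]
    by_cases hgc : g = c
    · have hr : ruleA corr g c = '2' := by simp [ruleA, hgc]
      have hb : (g == c) = true := by simp [hgc]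
      rw [hr, hb]
      simp only [alignA2, passC]
      rw [if_neg (by decide : ¬('2' : Char) = 'X'), if_pos trivial]
      exact congrArg _ (ih added rem hI hpos)
    · have hb : (g == c) = false := by simp [hgc]
      rw [hb]
      by_cases hmem : g ∈ corr
      · have hr : ruleA corr g c = 'X' := by simp [ruleA, hgc, hmem]
        rw [hr]
        simp only [alignA2, passC]
        rw [if_pos trivial, if_neg (by decide : ¬(false = true))]
        by_cases hlt : added.getD g 0 < (corr.count g : Int)
        · rw [if_pos hlt, if_pos (by rw [hI g]; omega)]
          refine congrArg _ (ih _ _ (fun x => ?_) (fun x => ?_))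
          · rw [PySem.Dict.getD_modify, PySem.Dict.getD_insert]
            by_cases hxg : x = g
            · subst hxg; rw [if_pos rfl, if_pos rfl, hI x]; ring
            · rw [if_neg hxg, if_neg hxg, hI x]
          · rw [PySem.Dict.getD_insert]
            by_cases hxg : x = g
            · subst hxg; rw [if_pos rfl]; have := hpos x; omega
            · rw [if_neg hxg]; exact hpos x
        · rw [if_neg hlt, if_neg (by rw [hI g]; omega)]
          exact congrArg _ (ih added rem hI hpos)
      · have hr : ruleA corr g c = '0' := by simp [ruleA, hgc, hmem]
        rw [hr]
        simp only [alignA2, passC]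
        rw [if_neg (by decide : ¬('0' : Char) = 'X'), if_neg (by decide : ¬(false = true))]
        have hcnt : corr.count g = 0 := List.count_eq_zero.mpr hmem
        rw [if_neg (by rw [hI g, hcnt]; have := hpos g; omega)]
        exact congrArg _ (ih added rem hI hpos)

-- the counter-consuming pass equals B's rank-based closed form
theorem passC_eq_codesB (avail0 : Char → Int) (hpos : ∀ x, 0 ≤ avail0 x) :
    ∀ (ps seen : List (Char × Bool)) (rem : PySem.Dict Char Int),
    (∀ x : Char, rem.getD x 0 =
      avail0 x - min ((seen.countP (fun p => !p.2 && p.1 == x) : Nat) : Int) (avail0 x)) →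
    passC ps rem = codesB avail0 seen ps := by
  intro ps
  induction ps with
  | nil => intro seen rem _; simp [passC, codesB]
  | cons p rest ih =>
    intro seen rem hI
    obtain ⟨g, mk⟩ := p
    cases mk with
    | true =>
      simp only [passC, codesB, if_pos trivial]
      refine congrArg _ (ih (seen ++ [(g, true)]) rem (fun x => ?_))
      rw [hI x]
      simp [List.countP_append]
    | false =>
      have hrg := hI g
      simp only [passC, codesB, if_neg (by decide : ¬(false = true))]
      by_cases hlt : ((seen.countP (fun p => !p.2 && p.1 == g) : Nat) : Int) < avail0 g
      · rw [if_pos hlt, if_pos (by rw [hrg]; omega)]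
        refine congrArg _ (ih (seen ++ [(g, false)]) _ (fun x => ?_))
        rw [PySem.Dict.getD_modify]
        by_cases hxg : x = g
        · subst hxg
          rw [if_pos rfl, hrg]
          have hc : (((seen ++ [(x, false)]).countP (fun p => !p.2 && p.1 == x) : Nat) : Int) =
              ((seen.countP (fun p => !p.2 && p.1 == x) : Nat) : Int) + 1 := by
            rw [List.countP_append]; simp
          rw [hc]
          omega
        · have hb : (g == x) = false := by simp [Ne.symm hxg]
          rw [if_neg hxg, hI x]
          have hc : ((seen ++ [(g, false)]).countP (fun p => !p.2 && p.1 == x) : Nat) =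
              seen.countP (fun p => !p.2 && p.1 == x) := by
            rw [List.countP_append]; simp [hb]
          rw [hc]
      · rw [if_neg hlt, if_neg (by rw [hrg]; have := hpos g; omega)]
        refine congrArg _ (ih (seen ++ [(g, false)]) rem (fun x => ?_))
        rw [hI x]
        by_cases hxg : x = g
        · subst hxg
          have hc : (((seen ++ [(x, false)]).countP (fun p => !p.2 && p.1 == x) : Nat) : Int) =
              ((seen.countP (fun p => !p.2 && p.1 == x) : Nat) : Int) + 1 := by
            rw [List.countP_append]; simp
          rw [hc]
          have := hpos x
          omega
        · have hb : (g == x) = false := by simp [Ne.symm hxg]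
          have hc : ((seen ++ [(g, false)]).countP (fun p => !p.2 && p.1 == x) : Nat) =
              seen.countP (fun p => !p.2 && p.1 == x) := by
            rw [List.countP_append]; simp [hb]
          rw [hc]

theorem greens_le_count (gs : List Char) : ∀ (cs : List Char) (x : Char),
    (gs.zip cs).countP (fun p => p.1 == p.2 && p.1 == x) ≤ cs.count x := by
  induction gs with
  | nil => intro cs x; simp
  | cons g gs ih =>
    intro cs x
    cases cs with
    | nil => simp
    | cons c cs =>
      rw [List.zip_cons_cons, List.countP_cons, List.count_cons]
      have := ih cs x
      by_cases h : (g == c && g == x) = true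
      · have hcx : (c == x) = true := by
          simp only [Bool.and_eq_true, beq_iff_eq] at h
          simp [← h.1, h.2]
        simp [h, hcx]; omega
      · simp [h]; split <;> omega

theorem guess_eq (gs cs : List Char) (hlen : gs.length ≤ cs.length)
    (hlow : ∀ g ∈ gs, g ∈ cs → isLow g) :
    assess_guessA gs cs = assess_guessB gs cs := by
  have hzlen : (gs.zip cs).length = gs.length := by
    rw [List.length_zip]; omega
  have h1 := pass1A_eq gs cs [] addedInitA hlen (by simpa using hlow)
    (fun x hx => addedInitA_contains x hx)
  simp only [List.nil_append, List.length_nil, Nat.cast_zero] at h1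
  have hcont1 : ∀ x : Char, isLow x → (greensA (gs.zip cs) addedInitA).contains x = true :=
    fun x hx => greensA_contains _ _ _ (addedInitA_contains x hx)
  have hzo : gs.zip ((gs.zip cs).map (fun p => ruleA cs p.1 p.2)) =
      (gs.zip cs).map (fun p => (p.1, ruleA cs p.1 p.2)) := zip_map_snd gs cs _
  have hX : ∀ p ∈ gs.zip ((gs.zip cs).map (fun p => ruleA cs p.1 p.2)), p.2 = 'X' → isLow p.1 := by
    rw [hzo]
    intro p hp hpx
    obtain ⟨q, hq, rfl⟩ := List.mem_map.mp hp
    have hpx' : ruleA cs q.1 q.2 = 'X' := hpx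
    have hqmem : q.1 ∈ cs := by
      unfold ruleA at hpx'
      split_ifs at hpx' with h1 h2
      · exact absurd hpx' (by decide)
      · exact h2
      · exact absurd hpx' (by decide)
    exact hlow q.1 (List.of_mem_zip hq).1 hqmem
  have h2 := pass2A_eq ((gs.zip cs).map (fun p => ruleA cs p.1 p.2)) gs [] cs
    (greensA (gs.zip cs) addedInitA) (by simp [hzlen]) hX hcont1
  simp only [List.nil_append, List.length_nil, Nat.cast_zero] at h2
  have hb := greenB_eq gs cs hlen
  have hzb : gs.zip ((gs.zip cs).map (fun p => p.1 == p.2)) =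
      (gs.zip cs).map (fun p => (p.1, p.1 == p.2)) := zip_map_snd gs cs _
  simp only [assess_guessA, h1, h2, assess_guessB, hb]
  refine congrArg (fun l => some (String.ofList l)) ?_
  -- the green-pass counts agree: availB is count-minus-greens
  have havail : ∀ x : Char,
      availB gs cs ((gs.zip cs).map (fun p => p.1 == p.2)) x =
        (cs.count x : Int) - ((gs.zip cs).countP (fun p => p.1 == p.2 && p.1 == x) : Int) := by
    intro x
    unfold availB
    rw [hzb, List.countP_map]
    rfl
  have hpos : ∀ x : Char, 0 ≤ availB gs cs ((gs.zip cs).map (fun p => p.1 == p.2)) x := by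
    intro x
    rw [havail x]
    have := greens_le_count gs cs x
    omega
  have hremInv : ∀ x : Char,
      (rem1C gs ((gs.zip cs).map (fun p => p.1 == p.2)) (rem0C cs)).getD x 0 =
        (cs.count x : Int) - ((gs.zip cs).countP (fun p => p.1 == p.2 && p.1 == x) : Int) := by
    intro x
    unfold rem1C
    rw [hzb, subfold_getD, List.countP_map]
    unfold rem0C
    rw [PySem.Dict.getD_foldl_insert_add_one, PySem.Dict.getD_empty]
    have hcomp : ((fun (p : Char × Bool) => p.2 && p.1 == x) ∘
        (fun (p : Char × Char) => (p.1, p.1 == p.2))) =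
        (fun (p : Char × Char) => p.1 == p.2 && p.1 == x) := rfl
    rw [hcomp]
    ring
  have hstep1 : alignA2 cs ((gs.zip cs).map (fun p => (p.1, ruleA cs p.1 p.2)))
        (greensA (gs.zip cs) addedInitA) =
      passC ((gs.zip cs).map (fun p => (p.1, p.1 == p.2)))
        (rem1C gs ((gs.zip cs).map (fun p => p.1 == p.2)) (rem0C cs)) := by
    refine core_eq (gs.zip cs) cs _ _ (fun x => ?_) (fun x => ?_)
    · rw [hremInv, greensA_getD, addedInitA_getD]
      ring
    · rw [greensA_getD, addedInitA_getD]
      positivity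
  have hstep2 : passC ((gs.zip cs).map (fun p => (p.1, p.1 == p.2)))
        (rem1C gs ((gs.zip cs).map (fun p => p.1 == p.2)) (rem0C cs)) =
      codesB (availB gs cs ((gs.zip cs).map (fun p => p.1 == p.2))) []
        ((gs.zip cs).map (fun p => (p.1, p.1 == p.2))) := by
    refine passC_eq_codesB _ hpos _ [] _ (fun x => ?_)
    have h0 : ((([] : List (Char × Bool)).countP (fun p => !p.2 && p.1 == x) : Nat) : Int) = 0 := by
      simp
    rw [h0, hremInv, havail x]
    have := hpos x
    rw [havail x] at this
    omega
  rw [hzo, hzb, hstep1, hstep2, ← hzb]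

-- ==== move-level lemmas ====

theorem keysB_mem : ∀ (n : Nat) (ks : List (List Char)) (p t : List Char), p ∈ ks →
    t.length = n → (∀ c ∈ t, c = '0' ∨ c = '1' ∨ c = '2') → p ++ t ∈ keysB n ks := by
  intro n
  induction n with
  | zero =>
    intro ks p t hp ht _
    rw [List.length_eq_zero_iff] at ht
    subst ht
    simpa [keysB] using hp
  | succ n ih =>
    intro ks p t hp ht hc
    cases t with
    | nil => simp at ht
    | cons c t =>
      have hstep : p ++ [c] ∈ keyStepB ks := by
        unfold keyStepB
        rw [List.mem_flatMap]
        refine ⟨p, hp, ?_⟩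
        rw [List.mem_map]
        refine ⟨c, ?_, rfl⟩
        rcases hc c (List.mem_cons_self) with h | h | h <;> subst h <;> decide
      have : (p ++ [c]) ++ t ∈ keysB n (keyStepB ks) :=
        ih (keyStepB ks) (p ++ [c]) t hstep (by simpa using ht)
          (fun x hx => hc x (List.mem_cons_of_mem _ hx))
      simpa [keysB] using this

theorem codesB_chars (avail : Char → Int) : ∀ (ps seen : List (Char × Bool)),
    ∀ c ∈ codesB avail seen ps, c = '0' ∨ c = '1' ∨ c = '2' := by
  intro ps
  induction ps with
  | nil => intro seen c hc; simp [codesB] at hc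
  | cons p rest ih =>
    intro seen c hc
    obtain ⟨g, mk⟩ := p
    simp only [codesB, List.mem_cons] at hc
    rcases hc with h | h
    · subst h; split_ifs <;> simp
    · exact ih _ c h

theorem codesB_length (avail : Char → Int) : ∀ (ps seen : List (Char × Bool)),
    (codesB avail seen ps).length = ps.length := by
  intro ps
  induction ps with
  | nil => intro seen; simp [codesB]
  | cons p rest ih =>
    intro seen
    obtain ⟨g, mk⟩ := p
    simp [codesB, ih]

theorem fbB_mem_KS (gs cs : List Char) (h5 : gs.length = 5) (hlen : gs.length ≤ cs.length) :
    ∀ s, assess_guessB gs cs = some s → s ∈ KS := by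
  intro s hs
  rw [assess_guessB, greenB_eq gs cs hlen] at hs
  simp only [Option.some.injEq] at hs
  set green := (gs.zip cs).map (fun p => p.1 == p.2) with hg
  set codes := codesB (availB gs cs green) [] (gs.zip green) with hcodes
  have hzl : (gs.zip green).length = gs.length := by
    rw [List.length_zip, hg, List.length_map, List.length_zip]
    omega
  have hclen : codes.length = 5 := by
    rw [hcodes, codesB_length, hzl, h5]
  have hcc : ∀ c ∈ codes, c = '0' ∨ c = '1' ∨ c = '2' := codesB_chars _ _ _
  have hmem : codes ∈ keysB 5 [[]] := by
    have := keysB_mem 5 [[]] [] codes (by simp) hclen hcc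
    simpa using this
  rw [← hs]
  unfold KS
  exact List.mem_map_of_mem hmem

-- the grouping step both sides share
theorem loopA_run (move : String) : ∀ (answers : List String)
    (d : PySem.Dict String (List String)) (ps : List (String × String)),
    (∀ a ∈ answers, assess_guessA move.toList a.toList = assess_guessB move.toList a.toList) →
    (∀ a ∈ answers, ∀ s, assess_guessB move.toList a.toList = some s → s ∈ KS) →
    pairsB move answers = some ps →
    d.keys = KS →
    loopA move answers d =
      some (ps.foldl (fun d p => d.insert p.1 (d.getD p.1 [] ++ [p.2])) d) ∧
    (ps.foldl (fun d p => d.insert p.1 (d.getD p.1 [] ++ [p.2])) d).keys = KS := by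
  intro answers
  induction answers with
  | nil =>
    intro d ps _ _ hps hk
    simp only [pairsB, Option.some.injEq] at hps
    subst hps
    exact ⟨by simp [loopA], by simpa using hk⟩
  | cons a rest ih =>
    intro d ps heq hKS hps hk
    have ha := heq a (List.mem_cons_self)
    cases hfb : assess_guessB move.toList a.toList with
    | none => rw [pairsB, hfb] at hps; exact absurd hps (by simp)
    | some r =>
      rw [pairsB, hfb] at hps
      cases hrest : pairsB move rest with
      | none => rw [hrest] at hps; exact absurd hps (by simp)
      | some ps' =>
        rw [hrest] at hps
        simp only [Option.some.injEq] at hps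
        subst hps
        have hrKS : r ∈ KS := hKS a (List.mem_cons_self) r hfb
        have hcont : d.contains r = true := by
          rw [PySem.Dict.contains_iff_mem_keys, hk]; exact hrKS
        have hget : d.get? r = some (d.getD r []) := by
          have := hcont
          rw [PySem.Dict.contains_eq_isSome_get?] at this
          cases hv : d.get? r with
          | none => rw [hv] at this; simp at this
          | some v => simp [PySem.Dict.getD_eq_get?_getD, hv]
        have hk' : (d.insert r (d.getD r [] ++ [a])).keys = KS := by
          rw [PySem.Dict.keys_insert_of_contains _ _ hcont, hk]
        have hrec := ih (d.insert r (d.getD r [] ++ [a])) ps'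
          (fun x hx => heq x (List.mem_cons_of_mem _ hx))
          (fun x hx => hKS x (List.mem_cons_of_mem _ hx)) hrest hk'
        refine ⟨?_, by simpa using hrec.2⟩
        rw [loopA, ha, hfb]
        show (match d.get? r with
              | none => none
              | some lst => loopA move rest (d.insert r (lst ++ [a]))) = _
        rw [hget]
        show loopA move rest (d.insert r (d.getD r [] ++ [a])) = _
        rw [hrec.1]
        simp

-- every answer admitted by Pre_ gets a feedback from B (the zip never runs short)
theorem pairsB_some (move : String) : ∀ (answers : List String),
    (∀ a ∈ answers, move.toList.length ≤ a.toList.length) →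
    ∃ ps, pairsB move answers = some ps := by
  intro answers
  induction answers with
  | nil => intro _; exact ⟨[], rfl⟩
  | cons a rest ih =>
    intro h
    obtain ⟨ps', hps'⟩ := ih (fun x hx => h x (List.mem_cons_of_mem _ hx))
    have hb := greenB_eq move.toList a.toList (h a (List.mem_cons_self))
    cases hfb : assess_guessB move.toList a.toList with
    | none => rw [assess_guessB, hb] at hfb; exact absurd hfb (by simp)
    | some r => exact ⟨(r, a) :: ps', by rw [pairsB, hfb, hps']⟩

-- ===== VERDICT (by name: the statement is the Claim_ definition above) =====
theorem assess_move_spec : Claim_equal_assess_move := by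
  intro answers move _ hpre
  unfold Spec_assess_move
  have hpre' : ∀ ans ∈ answers, move.toList.length = 5 ∧ 5 ≤ ans.toList.length ∧
      ∀ c ∈ move.toList, c ∈ ans.toList → isLow c := by
    intro ans hans
    obtain ⟨h1, h2, h3⟩ := hpre ans hans
    refine ⟨h1, h2, fun c hc hmem => ?_⟩
    have := List.all_eq_true.mp h3 c hc
    simp only [List.contains_eq_mem, hmem, Bool.not_true, Bool.false_or, decide_true,
      Bool.and_eq_true, decide_eq_true_eq] at this
    exact this
  have hlenle : ∀ a ∈ answers, move.toList.length ≤ a.toList.length := by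
    intro a ha
    obtain ⟨h1, h2, _⟩ := hpre' a ha
    omega
  obtain ⟨ps, hps⟩ := pairsB_some move answers hlenle
  have heq : ∀ a ∈ answers, assess_guessA move.toList a.toList =
      assess_guessB move.toList a.toList := by
    intro a ha
    exact guess_eq _ _ (hlenle a ha) (hpre' a ha).2.2
  have hKSmem : ∀ a ∈ answers, ∀ s, assess_guessB move.toList a.toList = some s → s ∈ KS := by
    intro a ha s hs
    exact fbB_mem_KS _ _ (hpre' a ha).1 (hlenle a ha) s hs
  have hrun := loopA_run move answers distInitA ps heq hKSmem hps KS_keys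
  unfold assess_move assess_move_alt
  rw [hrun.1, hps]
  -- A's final dict: items over its keys, which stay the 243 patterns
  set D := ps.foldl (fun d p => d.insert p.1 (d.getD p.1 [] ++ [p.2])) distInitA with hD
  show D.items = ((keysB 5 [[]]).foldl
      (fun d k => d.insert (String.ofList k) ((groupsB ps).getD (String.ofList k) []))
      PySem.Dict.empty).items
  have hnodup : D.keys.Nodup := by rw [hrun.2]; exact KS_nodup
  have hitemsA : D.items = KS.map (fun k => (k, D.getD k [])) := by
    have := PySem.Dict.items_eq_map_keys D hnodup ([] : List String)
    rw [hrun.2] at this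
    exact this
  -- A's per-key contents = the grouped answers; the shared fold is a modify loop
  have hgetD : ∀ k, D.getD k [] = (groupsB ps).getD k [] := by
    intro k
    have hA : D.getD k [] =
        distInitA.getD k [] ++ (ps.filter (fun p => p.1 == k)).map (·.2) := by
      rw [hD]
      exact PySem.Dict.getD_foldl_modify_append ps distInitA k
    have hB : (groupsB ps).getD k [] =
        PySem.Dict.empty.getD k [] ++ (ps.filter (fun p => p.1 == k)).map (·.2) := by
      unfold groupsB
      exact PySem.Dict.getD_foldl_modify_append ps PySem.Dict.empty k
    rw [hA, hB, distInitA_getD]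
    simp [PySem.Dict.getD_empty]
  -- B's final dict: a fold over 243 fresh distinct keys
  have hfresh : ∀ a ∈ keysB 5 [[]],
      (PySem.Dict.empty : PySem.Dict String (List String)).contains (String.ofList a) = false :=
    fun a _ => PySem.Dict.contains_empty _
  have hknd : ((keysB 5 [[]]).map String.ofList).Nodup := KS_nodup
  have hitemsB := PySem.Dict.items_foldl_insert_fresh (keysB 5 [[]])
    (fun a => String.ofList a) (fun a => (groupsB ps).getD (String.ofList a) [])
    PySem.Dict.empty hfresh hknd
  rw [hitemsA, hitemsB]
  show KS.map (fun k => (k, D.getD k [])) =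
    (keysB 5 [[]]).map (fun a => (String.ofList a, (groupsB ps).getD (String.ofList a) []))
  unfold KS
  rw [List.map_map]
  refine List.map_congr_left (fun k _ => ?_)
  simp [hgetD]
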